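-- pv_equiv track=rewrite | github.com/azusa152/Second-brain-interface | backend/infrastructure/qdrant_adapter.py | _build_note_path_prefixes
-- ===== SOURCE A (Python) =====
-- def _build_note_path_prefixes(note_path: str) -> list[str]:
--     """Build directory-prefix tokens used for strict path_prefix filtering."""
--     normalized_path = note_path.strip().replace("\\", "/").lstrip("/")
--     if "/" not in normalized_path:
--         return []
--
--     parent_path = normalized_path.rsplit("/", 1)[0]
--     prefixes: list[str] = []
--     current = ""
--     for part in parent_path.split("/"):
--         current = f"{current}{part}/" if current else f"{part}/"
--         prefixes.append(current)
--     return prefixes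
-- ===== SOURCE B (Python) =====
-- def _build_note_path_prefixes(note_path: str) -> list[str]:
--     """Build directory-prefix tokens used for strict path_prefix filtering."""
--     normalized_path = note_path.strip().replace("\\", "/").lstrip("/")
--     if "/" not in normalized_path:
--         return []
--     parts = normalized_path.rsplit("/", 1)[0].split("/")
--     return ["/".join(parts[:i + 1]) + "/" for i in range(len(parts))]
-- ===== Notes on version B (the rewrite author's own statement) =====
-- stated objective: alternative
-- what changed: B drops A's running-accumulator string threaded through the loop and instead splits the parent path once and rebuilds each prefix independently by joining a growing slice of the parts in a range comprehension.
import Mathlib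
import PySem

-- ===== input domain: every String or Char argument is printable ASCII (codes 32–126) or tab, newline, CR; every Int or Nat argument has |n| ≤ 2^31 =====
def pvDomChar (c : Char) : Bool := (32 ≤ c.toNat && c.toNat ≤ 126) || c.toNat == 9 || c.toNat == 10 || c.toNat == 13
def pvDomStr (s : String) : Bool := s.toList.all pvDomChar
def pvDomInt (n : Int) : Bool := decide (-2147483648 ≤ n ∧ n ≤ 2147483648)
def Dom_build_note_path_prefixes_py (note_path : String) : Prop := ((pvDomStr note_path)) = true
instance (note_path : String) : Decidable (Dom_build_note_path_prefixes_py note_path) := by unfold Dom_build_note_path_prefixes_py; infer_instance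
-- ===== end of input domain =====

-- B replaces A's running-accumulator loop by building each prefix directly from a
-- slice of the split parts (objective: alternative decomposition, same cost class).

-- shared normalization line of both Pythons:
-- note_path.strip().replace("\\", "/").lstrip("/")
-- (.lstrip("/") is ported by hand as dropWhile (· == '/'); exact: it drops exactly
--  the leading '/' characters)
def pvNormalize (cs : List Char) : List Char :=
  (PySem.Chars.replace (PySem.Chars.strip cs) ['\\'] ['/']).dropWhile (· == '/')

-- shared line of both Pythons: cs.rsplit("/", 1)[0], ported by hand;
-- exact whenever '/' ∈ cs: the text strictly before the LAST '/'
def pvRsplitHead (cs : List Char) : List Char :=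
  ((cs.reverse.dropWhile (fun c => !(c == '/'))).tail).reverse

-- ===== PORT A =====
def build_note_path_prefixes_py (note_path : String) : List String :=
  let normalized_path := pvNormalize note_path.toList
  if PySem.Chars.isIn ['/'] normalized_path = false then []
  else
    let parent_path := pvRsplitHead normalized_path
    let st := (PySem.Chars.splitOn parent_path ['/']).foldl
      (fun (st : List Char × List (List Char)) part =>
        let current := if st.1 = [] then part ++ ['/'] else st.1 ++ part ++ ['/']
        (current, st.2 ++ [current]))
      (([] : List Char), ([] : List (List Char)))
    st.2.map String.ofList

-- ===== PORT B =====
def build_note_path_prefixes_py_alt (note_path : String) : List String :=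
  let normalized_path := pvNormalize note_path.toList
  if PySem.Chars.isIn ['/'] normalized_path = false then []
  else
    let parts := PySem.Chars.splitOn (pvRsplitHead normalized_path) ['/']
    (List.range parts.length).map (fun i =>
      String.ofList (PySem.Chars.join ['/'] (PySem.List.slice parts none (some ((i + 1 : Nat) : Int))) ++ ['/']))

-- ===== PRECONDITION & SPEC =====
def Spec_build_note_path_prefixes_py (note_path : String) (out : List String) : Prop := out = build_note_path_prefixes_py_alt note_path
instance (note_path : String) (out : List String) : Decidable (Spec_build_note_path_prefixes_py note_path out) := by unfold Spec_build_note_path_prefixes_py; infer_instance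

-- ===== CLAIM (what is proved, stated in full; the proofs are below) =====
def Claim_equal_build_note_path_prefixes_py : Prop := ∀ (note_path : String), Dom_build_note_path_prefixes_py note_path → Spec_build_note_path_prefixes_py note_path (build_note_path_prefixes_py note_path)

-- ===== LEMMAS AND PROOFS =====

-- A's loop body never needs the empty-accumulator branch separately
theorem pvStepFun_eq :
    (fun (st : List Char × List (List Char)) part =>
       let current := if st.1 = [] then part ++ ['/'] else st.1 ++ part ++ ['/']
       (current, st.2 ++ [current]))
    = (fun (st : List Char × List (List Char)) part =>
       (st.1 ++ part ++ ['/'], st.2 ++ [st.1 ++ part ++ ['/']])) := by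
  funext st part
  have h : (if st.1 = [] then part ++ ['/'] else st.1 ++ part ++ ['/']) = st.1 ++ part ++ ['/'] := by
    rcases st with ⟨cur, acc⟩; cases cur <;> simp
  simp only [h]

-- invariant of A's accumulator loop (in its branch-free form)
theorem pvLoop_eq (parts : List (List Char)) : ∀ (cur : List Char) (acc : List (List Char)),
    (parts.foldl
      (fun (st : List Char × List (List Char)) part =>
        (st.1 ++ part ++ ['/'], st.2 ++ [st.1 ++ part ++ ['/']])) (cur, acc)).2
    = acc ++ (List.range parts.length).map
        (fun i => cur ++ PySem.Chars.join ['/'] (parts.take (i + 1)) ++ ['/']) := by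
  induction parts with
  | nil => intro cur acc; simp
  | cons p rest ih =>
    intro cur acc
    simp only [List.foldl_cons]
    rw [ih]
    simp only [List.length_cons, List.range_succ_eq_map, List.map_cons, List.map_map,
      List.append_assoc, List.singleton_append]
    congr 1
    congr 1
    · simp [PySem.Chars.join_singleton]
    apply List.map_congr_left
    intro i hi
    simp only [List.mem_range] at hi
    simp only [Function.comp_apply]
    obtain ⟨b, l, hb⟩ : ∃ b l, rest.take (i + 1) = b :: l := by
      cases h : rest.take (i + 1) with
      | nil =>
        exfalso
        have := congrArg List.length h
        simp only [List.length_take, List.length_nil] at this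
        omega
      | cons b l => exact ⟨b, l, rfl⟩
    simp [List.take_succ_cons, hb, PySem.Chars.join_cons_cons]

-- B's comprehension equals the mapped image of A's loop output
theorem pvBody_eq (parts : List (List Char)) :
    ((parts.foldl
      (fun (st : List Char × List (List Char)) part =>
        let current := if st.1 = [] then part ++ ['/'] else st.1 ++ part ++ ['/']
        (current, st.2 ++ [current]))
      (([] : List Char), ([] : List (List Char)))).2).map String.ofList
    = (List.range parts.length).map (fun i =>
        String.ofList (PySem.Chars.join ['/'] (PySem.List.slice parts none (some ((i + 1 : Nat) : Int))) ++ ['/'])) := by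
  rw [pvStepFun_eq, pvLoop_eq]
  simp only [List.nil_append, List.map_map]
  apply List.map_congr_left
  intro i _
  simp only [Function.comp_apply, PySem.List.slice_to_natCast]

theorem build_note_path_prefixes_py_eq_alt (note_path : String) :
    build_note_path_prefixes_py note_path = build_note_path_prefixes_py_alt note_path := by
  unfold build_note_path_prefixes_py build_note_path_prefixes_py_alt
  dsimp only
  generalize pvNormalize note_path.toList = ns
  cases h : PySem.Chars.isIn ['/'] ns with
  | false => simp
  | true =>
    rw [if_neg (by simp), if_neg (by simp)]
    exact pvBody_eq _

-- ===== VERDICT (by name: the statement is the Claim_ definition above) =====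
set_option maxHeartbeats 1000000 in
theorem build_note_path_prefixes_py_spec : Claim_equal_build_note_path_prefixes_py := by
  unfold Claim_equal_build_note_path_prefixes_py Spec_build_note_path_prefixes_py
  intro note_path _
  exact build_note_path_prefixes_py_eq_alt note_path
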